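-- pv_equiv track=rewrite | github.com/jubeenshah/100-days-of-code | code-files/Day-001-010/Day-10/Question-1/solution.py | triplets
-- ===== SOURCE A (Python) =====
-- def triplets(a, b, c):
--     a, b, c = map(lambda x: sorted(set(x)), (a, b, c))
--     i_p = 0
--     i_r = 0
--     count = 0
--     for q in b:
--         while i_p < len(a) and a[i_p] <= q:
--             i_p += 1
--
--         while i_r < len(c) and c[i_r] <= q:
--             i_r += 1
--
--         count += i_p * i_r
--     return count
-- ===== SOURCE B (Python) =====
-- import bisect
--
--
-- def triplets(a, b, c):
--     sa = sorted(set(a))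
--     sc = sorted(set(c))
--     return sum(bisect.bisect_right(sa, q) * bisect.bisect_right(sc, q)
--                for q in sorted(set(b)))
-- ===== Notes on version B (the rewrite author's own statement) =====
-- stated objective: alternative
-- what changed: Replaces the coordinated two-pointer sweep carrying mutable i_p/i_r state across queries with independent binary searches (bisect_right) into the sorted distinct a and c per query, summed in a comprehension.
import Mathlib
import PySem

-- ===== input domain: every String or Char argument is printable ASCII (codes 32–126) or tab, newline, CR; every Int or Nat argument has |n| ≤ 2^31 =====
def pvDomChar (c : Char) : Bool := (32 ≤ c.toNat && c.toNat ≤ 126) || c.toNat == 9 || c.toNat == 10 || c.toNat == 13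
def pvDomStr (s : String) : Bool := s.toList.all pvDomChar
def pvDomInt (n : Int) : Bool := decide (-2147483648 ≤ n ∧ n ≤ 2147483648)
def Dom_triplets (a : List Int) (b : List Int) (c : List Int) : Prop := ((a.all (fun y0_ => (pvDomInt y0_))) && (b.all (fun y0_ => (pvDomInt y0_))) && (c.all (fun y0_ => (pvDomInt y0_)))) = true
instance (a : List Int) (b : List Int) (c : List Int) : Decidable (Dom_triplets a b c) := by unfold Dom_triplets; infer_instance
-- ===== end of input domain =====

-- B replaces A's coordinated two-pointer sweep by an independent bisect_right per query; same cost class, no speed claim.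

-- ===== PORT A =====
-- the 'while i < len(xs) and xs[i] <= q: i += 1' loop of A
def tripletsAdv (xs : List Int) (q : Int) (i : Nat) : Nat :=
  if h : i < xs.length then
    if xs[i] ≤ q then tripletsAdv xs q (i + 1) else i
  else i
termination_by xs.length - i

-- the 'for q in b' loop of A, threading (i_p, i_r, count)
def tripletsLoop (sa sc : List Int) : List Int → Nat → Nat → Int → Int
  | [], _, _, count => count
  | q :: rest, ip, ir, count =>
      let ip' := tripletsAdv sa q ip
      let ir' := tripletsAdv sc q ir
      tripletsLoop sa sc rest ip' ir' (count + (ip' : Int) * (ir' : Int))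

def triplets (a : List Int) (b : List Int) (c : List Int) : Int :=
  let sa := PySem.List.sorted (PySem.Set.ofList a) (fun x => x)
  let sb := PySem.List.sorted (PySem.Set.ofList b) (fun x => x)
  let sc := PySem.List.sorted (PySem.Set.ofList c) (fun x => x)
  tripletsLoop sa sc sb 0 0 0

-- ===== PORT B =====
def triplets_alt (a : List Int) (b : List Int) (c : List Int) : Int :=
  let sa := PySem.List.sorted (PySem.Set.ofList a) (fun x => x)
  let sc := PySem.List.sorted (PySem.Set.ofList c) (fun x => x)
  ((PySem.List.sorted (PySem.Set.ofList b) (fun x => x)).map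
    (fun q => (PySem.List.bisectRight sa q : Int) * (PySem.List.bisectRight sc q : Int))).sum

-- ===== PRECONDITION & SPEC =====
def Spec_triplets (a : List Int) (b : List Int) (c : List Int) (out : Int) : Prop := out = triplets_alt a b c
instance (a : List Int) (b : List Int) (c : List Int) (out : Int) : Decidable (Spec_triplets a b c out) := by unfold Spec_triplets; infer_instance

-- ===== CLAIM (what is proved, stated in full; the proofs are below) =====
def Claim_equal_triplets : Prop := ∀ (a : List Int) (b : List Int) (c : List Int), Dom_triplets a b c → Spec_triplets a b c (triplets a b c)

-- ===== LEMMAS AND PROOFS =====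

-- fuel-indexed form of: on a (≤)-sorted list, the pointer-advance loop started below the answer lands on bisect_right
theorem tripletsAdv_eq_aux (xs : List Int) (q : Int)
    (hs : List.Pairwise (· ≤ ·) xs) :
    ∀ (n i : Nat), xs.length - i ≤ n → i ≤ xs.length →
      (∀ j (hj : j < xs.length), j < i → xs[j] ≤ q) →
      tripletsAdv xs q i = PySem.List.bisectRight xs q := by
  obtain ⟨hr, hlt, hge⟩ := PySem.List.bisectRight_spec xs q hs
  intro n
  induction n with
  | zero =>
    intro i hfuel hile hbelow
    have hi : i = xs.length := by omega
    rw [tripletsAdv]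
    simp only [hi, lt_irrefl, dite_false]
    by_contra hne
    have hrlt : PySem.List.bisectRight xs q < xs.length := by omega
    have h1 := hge _ hrlt (le_refl _)
    have h2 := hbelow _ hrlt (by omega)
    omega
  | succ n IH =>
    intro i hfuel hile hbelow
    rw [tripletsAdv]
    by_cases hi : i < xs.length
    · simp only [hi, dite_true]
      by_cases hle : xs[i] ≤ q
      · simp only [hle, if_true]
        exact IH (i + 1) (by omega) (by omega) (by
          intro j hj hji
          by_cases hji' : j < i
          · exact hbelow j hj hji'
          · have : j = i := by omega
            simpa [this] using hle)
      · simp only [hle, if_false]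
        by_contra hne
        rcases Nat.lt_or_ge i (PySem.List.bisectRight xs q) with hlt' | hge'
        · exact hle (hlt _ hi hlt')
        · have hrlt : PySem.List.bisectRight xs q < xs.length := by omega
          have h1 := hge _ hrlt (le_refl _)
          have h2 := hbelow _ hrlt (by omega)
          omega
    · simp only [hi, dite_false]
      have hieq : i = xs.length := by omega
      by_contra hne
      have hrlt : PySem.List.bisectRight xs q < xs.length := by omega
      have h1 := hge _ hrlt (le_refl _)
      have h2 := hbelow _ hrlt (by omega)
      omega

theorem tripletsAdv_eq (xs : List Int) (q : Int)
    (hs : List.Pairwise (· ≤ ·) xs) (i : Nat) (hile : i ≤ xs.length)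
    (hbelow : ∀ j (hj : j < xs.length), j < i → xs[j] ≤ q) :
    tripletsAdv xs q i = PySem.List.bisectRight xs q :=
  tripletsAdv_eq_aux xs q hs xs.length i (by omega) hile hbelow

-- A's sweep over a sorted query list equals the per-query bisect sum, generalised over the pointer state
theorem tripletsLoop_eq (sa sc : List Int)
    (hsa : List.Pairwise (· ≤ ·) sa) (hsc : List.Pairwise (· ≤ ·) sc) :
    ∀ (sb : List Int) (ip ir : Nat) (count : Int),
      List.Pairwise (· ≤ ·) sb →
      ip ≤ sa.length → ir ≤ sc.length →
      (∀ q ∈ sb, ∀ j (hj : j < sa.length), j < ip → sa[j] ≤ q) →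
      (∀ q ∈ sb, ∀ j (hj : j < sc.length), j < ir → sc[j] ≤ q) →
      tripletsLoop sa sc sb ip ir count =
        count + (sb.map (fun q =>
          ((PySem.List.bisectRight sa q : Nat) : Int) * ((PySem.List.bisectRight sc q : Nat) : Int))).sum := by
  intro sb
  induction sb with
  | nil => intro ip ir count _ _ _ _ _; simp [tripletsLoop]
  | cons q rest IH =>
    intro ip ir count hsb hip hir ha hc
    obtain ⟨hqr, hrest⟩ := List.pairwise_cons.mp hsb
    obtain ⟨hra, hlta, _⟩ := PySem.List.bisectRight_spec sa q hsa
    obtain ⟨hrc, hltc, _⟩ := PySem.List.bisectRight_spec sc q hsc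
    simp only [tripletsLoop]
    rw [tripletsAdv_eq sa q hsa ip hip (ha q (List.mem_cons_self ..)),
        tripletsAdv_eq sc q hsc ir hir (hc q (List.mem_cons_self ..))]
    rw [IH _ _ _ hrest hra hrc
        (fun q' hq' j hj hjr => le_trans (hlta j hj hjr) (hqr q' hq'))
        (fun q' hq' j hj hjr => le_trans (hltc j hj hjr) (hqr q' hq'))]
    simp only [List.map_cons, List.sum_cons]
    ring

-- ===== VERDICT (by name: the statement is the Claim_ definition above) =====
theorem triplets_spec : Claim_equal_triplets := by
  intro a b c _
  unfold Spec_triplets triplets triplets_alt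
  rw [tripletsLoop_eq _ _ (PySem.List.sorted_pairwise _ _) (PySem.List.sorted_pairwise _ _)
      _ 0 0 0 (PySem.List.sorted_pairwise _ _) (by omega) (by omega)
      (fun _ _ j _ hj => absurd hj (by omega)) (fun _ _ j _ hj => absurd hj (by omega))]
  simp
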